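-- pv_equiv track=rewrite | github.com/jokob-sk/NetAlertX | test/backend/sql_safe_builder.py | _is_compound_condition
-- ===== SOURCE A (Python) =====
-- def _is_compound_condition(condition: str) -> bool:
--     """
--     Determine if a condition contains multiple clauses (compound condition).
--
--     A compound condition has multiple logical operators (AND/OR) connecting
--     separate comparison clauses.
--
--     Args:
--         condition: Condition string to check
--
--     Returns:
--         True if compound (multiple clauses), False if single clause
--     """
--     # Track if we're inside quotes to avoid counting operators in quoted strings
--     in_quotes = False
--     logical_op_count = 0
--     i = 0
--
--     while i < len(condition):
--         char = condition[i]
--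
--         # Toggle quote state
--         if char == "'":
--             in_quotes = not in_quotes
--             i += 1
--             continue
--
--         # Only count logical operators outside of quotes
--         if not in_quotes:
--             # Look for AND or OR as whole words
--             remaining = condition[i:].upper()
--
--             # Check for AND (must be word boundary)
--             if remaining.startswith("AND ") or remaining.startswith("AND\t"):
--                 logical_op_count += 1
--                 i += 3
--                 continue
--
--             # Check for OR (must be word boundary)
--             if remaining.startswith("OR ") or remaining.startswith("OR\t"):
--                 logical_op_count += 1
--                 i += 2
--                 continue
--
--         i += 1
--
--     # A compound condition has more than one logical operator
--     # (first AND/OR starts the condition, subsequent ones connect clauses)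
--     return logical_op_count > 1
-- ===== SOURCE B (Python) =====
-- def _is_compound_condition(condition: str) -> bool:
--     # Split on single quotes: even-indexed pieces are the text outside quotes
--     # (this parity matches the quote-toggle even for unbalanced quotes).
--     total = 0
--     idx = 0
--     for piece in condition.split("'"):
--         if idx % 2 == 0:
--             up = piece.upper()
--             total += (up.count("AND ") + up.count("AND\t")
--                       + up.count("OR ") + up.count("OR\t"))
--         idx += 1
--     return total > 1
-- ===== Notes on version B (the rewrite author's own statement) =====
-- stated objective: faster
-- what changed: Replaces A's index-driven while loop (quote toggle, manual i skips, and a fresh condition[i:].upper() suffix copy at every position) with a split on the quote character: even-indexed pieces are the out-of-quote text, each is uppercased once and the four operator tokens ('AND '/'AND\t'/'OR '/'OR\t') are counted with str.count and summed.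
import Mathlib
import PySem

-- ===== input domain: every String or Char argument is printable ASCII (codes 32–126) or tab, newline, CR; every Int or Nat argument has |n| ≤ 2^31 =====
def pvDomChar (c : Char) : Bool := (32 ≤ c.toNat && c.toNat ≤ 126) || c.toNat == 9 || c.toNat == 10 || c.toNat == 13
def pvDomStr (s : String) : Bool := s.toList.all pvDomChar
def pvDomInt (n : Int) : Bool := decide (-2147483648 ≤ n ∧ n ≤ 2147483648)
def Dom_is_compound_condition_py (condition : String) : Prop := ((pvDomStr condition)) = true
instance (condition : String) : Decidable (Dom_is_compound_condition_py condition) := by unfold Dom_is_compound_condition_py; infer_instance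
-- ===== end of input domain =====

-- B replaces A's index-driven quote-toggle scan by split-on-quote + per-piece substring counting (idiomatic; return value only).


-- ===== PORT A =====
-- A's while loop over index i, as structural recursion on the remaining characters:
-- `condition[i:]` is the argument list, `i += k` is dropping k characters.
def pvLoopA (l : List Char) (in_quotes : Bool) (logical_op_count : Nat) : Nat :=
  match l with
  | [] => logical_op_count
  | char :: rest =>
    if char = '\'' then pvLoopA rest (!in_quotes) logical_op_count
    else if !in_quotes then
      -- remaining = condition[i:].upper()
      let remaining := PySem.Chars.upper (char :: rest)
      if PySem.Chars.startswith remaining ['A','N','D',' '] ||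
         PySem.Chars.startswith remaining ['A','N','D','\t'] then
        pvLoopA (rest.drop 2) in_quotes (logical_op_count + 1)   -- i += 3
      else if PySem.Chars.startswith remaining ['O','R',' '] ||
              PySem.Chars.startswith remaining ['O','R','\t'] then
        pvLoopA (rest.drop 1) in_quotes (logical_op_count + 1)   -- i += 2
      else pvLoopA rest in_quotes logical_op_count               -- i += 1
    else pvLoopA rest in_quotes logical_op_count                 -- i += 1
termination_by l.length
decreasing_by all_goals (simp [List.length_drop]; try omega)

def is_compound_condition_py (condition : String) : Bool :=
  decide (1 < pvLoopA condition.toList false 0)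

-- ===== PORT B =====
-- the four up.count(...) calls of one piece (str.count = PySem.Chars.count on the list side)
def pvCnt4 (piece : List Char) : Nat :=
  let up := PySem.Chars.upper piece
  PySem.Chars.count up ['A','N','D',' '] + PySem.Chars.count up ['A','N','D','\t'] +
    PySem.Chars.count up ['O','R',' '] + PySem.Chars.count up ['O','R','\t']

-- the for-loop over condition.split("'") with the running idx and total
def pvSumB (idx : Nat) (total : Nat) (pieces : List (List Char)) : Nat :=
  match pieces with
  | [] => total
  | piece :: rest => pvSumB (idx + 1) (if idx % 2 = 0 then total + pvCnt4 piece else total) rest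

def is_compound_condition_py_alt (condition : String) : Bool :=
  -- condition.split("'") = PySem.Chars.splitOn on the list side (separator nonempty)
  decide (1 < pvSumB 0 0 (PySem.Chars.splitOn condition.toList ['\'']))

-- ===== PRECONDITION & SPEC =====
def Spec_is_compound_condition_py (condition : String) (out : Bool) : Prop := out = is_compound_condition_py_alt condition
instance (condition : String) (out : Bool) : Decidable (Spec_is_compound_condition_py condition out) := by unfold Spec_is_compound_condition_py; infer_instance

-- ===== CLAIM (what is proved, stated in full; the proofs are below) =====
def Claim_equal_is_compound_condition_py : Prop := ∀ (condition : String), Dom_is_compound_condition_py condition → Spec_is_compound_condition_py condition (is_compound_condition_py condition)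

-- ===== LEMMAS AND PROOFS =====

-- does one of the four operator tokens start here?
def pvMatch4 (l : List Char) : Bool :=
  (['A','N','D',' ']).isPrefixOf l || (['A','N','D','\t']).isPrefixOf l ||
    (['O','R',' ']).isPrefixOf l || (['O','R','\t']).isPrefixOf l

-- number of positions where a token starts
def pvPosCnt : List Char → Nat
  | [] => 0
  | c :: t => (if pvMatch4 (c :: t) then 1 else 0) + pvPosCnt t

-- reference split on the quote character
def pvSplit : List Char → List (List Char)
  | [] => [[]]
  | c :: t => if c = '\'' then [] :: pvSplit t else (c :: (pvSplit t).headI) :: (pvSplit t).tail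

-- alternating sum of position counts over the pieces (q = inside quotes)
def pvSeg : Bool → List (List Char) → Nat
  | _, [] => 0
  | q, p :: ps => (if q then 0 else pvPosCnt (PySem.Chars.upper p)) + pvSeg (!q) ps

-- greedy non-overlapping count of sub (what str.count computes), fuel-free
def pvGCount (sub : List Char) (l : List Char) : Nat :=
  match l with
  | [] => 0
  | c :: t => if sub.isPrefixOf (c :: t) then 1 + pvGCount sub (t.drop (sub.length - 1)) else pvGCount sub t
termination_by l.length
decreasing_by all_goals (simp [List.length_drop]; try omega)

lemma pvGCount_nil (sub : List Char) : pvGCount sub [] = 0 := by rw [pvGCount]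

lemma pvGCount_pos {sub : List Char} {c : Char} {t : List Char}
    (h : sub.isPrefixOf (c :: t) = true) :
    pvGCount sub (c :: t) = 1 + pvGCount sub (t.drop (sub.length - 1)) := by
  rw [pvGCount]; simp [h]

lemma pvGCount_neg {sub : List Char} {c : Char} {t : List Char}
    (h : sub.isPrefixOf (c :: t) = false) :
    pvGCount sub (c :: t) = pvGCount sub t := by
  rw [pvGCount]; simp [h]

lemma pvGCount_cons (sub : List Char) (c : Char) (t : List Char) :
    pvGCount sub (c :: t) =
      if sub.isPrefixOf (c :: t) then 1 + pvGCount sub (t.drop (sub.length - 1))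
      else pvGCount sub t := by
  rw [pvGCount]

lemma pvCountGoNil (sub : List Char) (fuel acc : Nat) :
    PySem.Chars.count.go sub fuel [] acc = acc := by
  cases fuel <;> (rw [PySem.Chars.count.go]; try omega)

lemma pvCountGoCons (sub : List Char) (n : Nat) (c : Char) (t : List Char) (acc : Nat) :
    PySem.Chars.count.go sub (n+1) (c :: t) acc =
      if sub.isPrefixOf (c :: t) then PySem.Chars.count.go sub n (List.drop sub.length (c :: t)) (acc+1)
      else PySem.Chars.count.go sub n t acc := by
  rw [PySem.Chars.count.go]

-- count.go with enough fuel is pvGCount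
lemma pvCountGo (sub : List Char) (hs : sub ≠ []) :
    ∀ (fuel : Nat) (l : List Char) (acc : Nat), l.length ≤ fuel →
      PySem.Chars.count.go sub fuel l acc = acc + pvGCount sub l := by
  intro fuel
  induction fuel with
  | zero =>
    intro l acc hl
    have : l = [] := by cases l <;> simp_all
    subst this; rw [pvCountGoNil, pvGCount_nil]; omega
  | succ n ih =>
    intro l acc hl
    cases l with
    | nil => rw [pvCountGoNil, pvGCount_nil]; omega
    | cons c t =>
      rw [pvCountGoCons]
      by_cases h : sub.isPrefixOf (c :: t) = true
      · rw [if_pos h, pvGCount_pos h]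
        have hlen : 1 ≤ sub.length := by cases sub <;> simp_all
        have hdrop : List.drop sub.length (c :: t) = t.drop (sub.length - 1) := by
          cases sub with
          | nil => simp_all
          | cons a s => simp
        rw [hdrop, ih]
        · omega
        · have h1 := List.length_drop (l := t) (i := sub.length - 1)
          simp at hl; omega
      · rw [if_neg h, pvGCount_neg (Bool.not_eq_true _ |>.mp h), ih]
        simp at hl; omega

lemma pvCount_eq (l sub : List Char) (hs : sub ≠ []) :
    PySem.Chars.count l sub = pvGCount sub l := by
  rw [PySem.Chars.count]
  have he : sub.isEmpty = false := by cases sub <;> simp_all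
  rw [he]
  simpa using pvCountGo sub hs l.length l 0 le_rfl

lemma pvSplit_ne_nil (l : List Char) : pvSplit l ≠ [] := by
  cases l with
  | nil => simp [pvSplit]
  | cons c t => rw [pvSplit]; split <;> simp

lemma pvSplit_cons_shape (l : List Char) : ∃ p ps, pvSplit l = p :: ps := by
  cases h : pvSplit l with
  | nil => exact absurd h (pvSplit_ne_nil l)
  | cons p ps => exact ⟨p, ps, rfl⟩

lemma pvSplitGoNil (fuel : Nat) (cur : List Char) (acc : List (List Char)) :
    PySem.Chars.splitOn.go ['\''] (fuel+1) [] cur acc = acc.reverse ++ [cur.reverse] := by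
  rw [PySem.Chars.splitOn.go]
  · simp
  · omega

lemma pvSplitGoCons (fuel : Nat) (c : Char) (rest cur : List Char) (acc : List (List Char)) :
    PySem.Chars.splitOn.go ['\''] (fuel+1) (c :: rest) cur acc =
      if ['\''].isPrefixOf (c :: rest) then
        PySem.Chars.splitOn.go ['\''] fuel (List.drop (['\''].length) (c :: rest)) [] (cur.reverse :: acc)
      else PySem.Chars.splitOn.go ['\''] fuel rest (c :: cur) acc := by
  rw [PySem.Chars.splitOn.go]

-- splitOn.go with enough fuel is pvSplit (single-char separator)
lemma pvSplitGo :
    ∀ (fuel : Nat) (l cur : List Char) (acc : List (List Char)), l.length < fuel →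
      PySem.Chars.splitOn.go ['\''] fuel l cur acc =
        acc.reverse ++ (pvSplit l).modifyHead (fun p => cur.reverse ++ p) := by
  intro fuel
  induction fuel with
  | zero => intro l cur acc hl; omega
  | succ n ih =>
    intro l cur acc hl
    cases l with
    | nil => rw [pvSplitGoNil]; simp [pvSplit]
    | cons c t =>
      rw [pvSplitGoCons]
      by_cases hq : c = '\''
      · subst hq
        rw [if_pos (by simp [List.isPrefixOf])]
        rw [show List.drop (['\''].length) ('\'' :: t) = t by simp]
        rw [ih t [] (cur.reverse :: acc) (by simp at hl ⊢; omega)]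
        obtain ⟨p, ps, hp⟩ := pvSplit_cons_shape t
        simp [pvSplit, hp]
      · rw [if_neg (by simp [List.isPrefixOf]; exact fun e => hq e.symm)]
        rw [ih t (c :: cur) acc (by simp at hl ⊢; omega)]
        obtain ⟨p, ps, hp⟩ := pvSplit_cons_shape t
        rw [pvSplit]
        simp [hq, hp]

lemma pvSplitOn_eq (l : List Char) :
    PySem.Chars.splitOn l ['\''] = pvSplit l := by
  rw [PySem.Chars.splitOn, pvSplitGo (l.length + 1) l [] [] (by omega)]
  obtain ⟨p, ps, hp⟩ := pvSplit_cons_shape l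
  simp [hp]

-- each head piece of pvSplit is a prefix of its source
lemma pvSplit_head_prefix (t : List Char) {p : List Char} {ps : List (List Char)}
    (h : pvSplit t = p :: ps) : p <+: t := by
  induction t generalizing p ps with
  | nil => simp [pvSplit] at h; simp [h.1]
  | cons c t ih =>
    rw [pvSplit] at h
    by_cases hq : c = '\''
    · rw [if_pos hq] at h
      exact (List.cons_eq_cons.mp h).1 ▸ List.nil_prefix
    · rw [if_neg hq] at h
      obtain ⟨p0, ps0, hp0⟩ := pvSplit_cons_shape t
      rw [hp0] at h
      simp at h
      obtain ⟨h1, _⟩ := h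
      rw [← h1]
      exact List.cons_prefix_cons.mpr ⟨rfl, ih hp0⟩

-- a token match survives extending the tail
lemma pvMatch4_mono {x : Char} {h t : List Char} (hp : h <+: t)
    (hm : pvMatch4 (x :: h) = true) : pvMatch4 (x :: t) = true := by
  have hc : (x :: h) <+: (x :: t) := List.cons_prefix_cons.mpr ⟨rfl, hp⟩
  simp only [pvMatch4, Bool.or_eq_true, List.isPrefixOf_iff_prefix] at hm ⊢
  rcases hm with ((h1 | h1) | h1) | h1
  · exact Or.inl (Or.inl (Or.inl (h1.trans hc)))
  · exact Or.inl (Or.inl (Or.inr (h1.trans hc)))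
  · exact Or.inl (Or.inr (h1.trans hc))
  · exact Or.inr (h1.trans hc)

-- the four greedy counts together count exactly the match positions
lemma pvG4 : ∀ (n : Nat) (u : List Char), u.length ≤ n →
    pvGCount ['A','N','D',' '] u + pvGCount ['A','N','D','\t'] u +
      pvGCount ['O','R',' '] u + pvGCount ['O','R','\t'] u = pvPosCnt u := by
  intro n
  induction n with
  | zero =>
    intro u hu
    have : u = [] := by cases u <;> simp_all
    subst this; simp [pvGCount_nil, pvPosCnt]
  | succ n ih =>
    intro u hu
    cases u with
    | nil => simp [pvGCount_nil, pvPosCnt]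
    | cons c t =>
      cases h1 : (['A','N','D',' ']).isPrefixOf (c :: t) with
      | true =>
        obtain ⟨w, hw⟩ := List.isPrefixOf_iff_prefix.mp h1
        obtain ⟨rfl, rfl⟩ : c = 'A' ∧ t = 'N'::'D'::' '::w := by simpa using hw.symm
        have hw' : w.length ≤ n := by simp at hu; omega
        simp only [pvGCount_cons, pvPosCnt, pvMatch4, List.isPrefixOf]
        simp
        rw [← ih w hw']
        omega
      | false =>
      cases h2 : (['A','N','D','\t']).isPrefixOf (c :: t) with
      | true =>
        obtain ⟨w, hw⟩ := List.isPrefixOf_iff_prefix.mp h2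
        obtain ⟨rfl, rfl⟩ : c = 'A' ∧ t = 'N'::'D'::'\t'::w := by simpa using hw.symm
        have hw' : w.length ≤ n := by simp at hu; omega
        simp only [pvGCount_cons, pvPosCnt, pvMatch4, List.isPrefixOf]
        simp
        rw [← ih w hw']
        omega
      | false =>
      cases h3 : (['O','R',' ']).isPrefixOf (c :: t) with
      | true =>
        obtain ⟨w, hw⟩ := List.isPrefixOf_iff_prefix.mp h3
        obtain ⟨rfl, rfl⟩ : c = 'O' ∧ t = 'R'::' '::w := by simpa using hw.symm
        have hw' : w.length ≤ n := by simp at hu; omega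
        simp only [pvGCount_cons, pvPosCnt, pvMatch4, List.isPrefixOf]
        simp
        rw [← ih w hw']
        omega
      | false =>
      cases h4 : (['O','R','\t']).isPrefixOf (c :: t) with
      | true =>
        obtain ⟨w, hw⟩ := List.isPrefixOf_iff_prefix.mp h4
        obtain ⟨rfl, rfl⟩ : c = 'O' ∧ t = 'R'::'\t'::w := by simpa using hw.symm
        have hw' : w.length ≤ n := by simp at hu; omega
        simp only [pvGCount_cons, pvPosCnt, pvMatch4, List.isPrefixOf]
        simp
        rw [← ih w hw']
        omega
      | false =>
        rw [pvGCount_neg h1, pvGCount_neg h2, pvGCount_neg h3, pvGCount_neg h4,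
            ih t (by simp at hu; omega)]
        have hm : pvMatch4 (c :: t) = false := by
          simp [pvMatch4, h1, h2, h3, h4]
        rw [pvPosCnt, hm]
        simp

lemma pvUpperQuote : PySem.Chars.upperChar '\'' = '\'' := by decide

lemma pvNeQuote {c x : Char} (h : PySem.Chars.upperChar c = x) (hx : x ≠ '\'') :
    c ≠ '\'' := by
  intro e; subst e; rw [pvUpperQuote] at h; exact hx h.symm

lemma pvLoopA_nil (q : Bool) (cnt : Nat) : pvLoopA [] q cnt = cnt := by rw [pvLoopA]

lemma pvLoopA_cons (c : Char) (rest : List Char) (q : Bool) (cnt : Nat) :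
    pvLoopA (c :: rest) q cnt =
      if c = '\'' then pvLoopA rest (!q) cnt
      else if !q then
        (if PySem.Chars.startswith (PySem.Chars.upper (c :: rest)) ['A','N','D',' '] ||
            PySem.Chars.startswith (PySem.Chars.upper (c :: rest)) ['A','N','D','\t'] then
          pvLoopA (rest.drop 2) q (cnt + 1)
        else if PySem.Chars.startswith (PySem.Chars.upper (c :: rest)) ['O','R',' '] ||
                PySem.Chars.startswith (PySem.Chars.upper (c :: rest)) ['O','R','\t'] then
          pvLoopA (rest.drop 1) q (cnt + 1)
        else pvLoopA rest q cnt)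
      else pvLoopA rest q cnt := by
  rw [pvLoopA]

-- the uppercased string has a 4-character prefix: peel four characters off the source
lemma pvShape4 {c : Char} {t w : List Char} {p1 p2 p3 p4 : Char}
    (hw : [p1,p2,p3,p4] ++ w = PySem.Chars.upper (c :: t)) :
    PySem.Chars.upperChar c = p1 ∧ ∃ c2 c3 c4 t4, t = c2::c3::c4::t4 ∧
      PySem.Chars.upperChar c2 = p2 ∧ PySem.Chars.upperChar c3 = p3 ∧
      PySem.Chars.upperChar c4 = p4 ∧ PySem.Chars.upper t4 = w := by
  cases t with
  | nil => simp [PySem.Chars.upper] at hw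
  | cons c2 t2 =>
    cases t2 with
    | nil => simp [PySem.Chars.upper] at hw
    | cons c3 t3 =>
      cases t3 with
      | nil => simp [PySem.Chars.upper] at hw
      | cons c4 t4 =>
        simp [PySem.Chars.upper] at hw
        obtain ⟨e1, e2, e3, e4, e5⟩ := hw
        exact ⟨e1.symm, c2, c3, c4, t4, rfl, e2.symm, e3.symm, e4.symm, e5.symm⟩

lemma pvShape3 {c : Char} {t w : List Char} {p1 p2 p3 : Char}
    (hw : [p1,p2,p3] ++ w = PySem.Chars.upper (c :: t)) :
    PySem.Chars.upperChar c = p1 ∧ ∃ c2 c3 t3, t = c2::c3::t3 ∧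
      PySem.Chars.upperChar c2 = p2 ∧ PySem.Chars.upperChar c3 = p3 ∧
      PySem.Chars.upper t3 = w := by
  cases t with
  | nil => simp [PySem.Chars.upper] at hw
  | cons c2 t2 =>
    cases t2 with
    | nil => simp [PySem.Chars.upper] at hw
    | cons c3 t3 =>
      simp [PySem.Chars.upper] at hw
      obtain ⟨e1, e2, e3, e4⟩ := hw
      exact ⟨e1.symm, c2, c3, t3, rfl, e2.symm, e3.symm, e4.symm⟩

-- A's loop computes the alternating per-piece position count
lemma pvLoopA_eq : ∀ (n : Nat) (l : List Char) (q : Bool) (cnt : Nat), l.length ≤ n →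
    pvLoopA l q cnt = cnt + pvSeg q (pvSplit l) := by
  intro n
  induction n with
  | zero =>
    intro l q cnt hl
    have : l = [] := by cases l <;> simp_all
    subst this
    simp [pvLoopA_nil, pvSplit, pvSeg, pvPosCnt, PySem.Chars.upper]
  | succ n ih =>
    intro l q cnt hl
    cases l with
    | nil => simp [pvLoopA_nil, pvSplit, pvSeg, pvPosCnt, PySem.Chars.upper]
    | cons c rest =>
      rw [pvLoopA_cons]
      by_cases hq : c = '\''
      · subst hq
        rw [if_pos rfl, ih rest (!q) cnt (by simp at hl; omega)]
        obtain ⟨p, ps, hp⟩ := pvSplit_cons_shape rest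
        simp [pvSplit, hp, pvSeg, PySem.Chars.upper, pvPosCnt]
      · rw [if_neg hq]
        obtain ⟨p, ps, hp⟩ := pvSplit_cons_shape rest
        have hsp : pvSplit (c :: rest) = (c :: p) :: ps := by simp [pvSplit, hq, hp]
        cases q with
        | true =>
          simp only [Bool.not_true, if_neg (by simp : ¬ (false : Bool) = true)]
          rw [ih rest true cnt (by simp at hl; omega), hp, hsp]
          simp [pvSeg]
        | false =>
          simp only [Bool.not_false, if_true]
          cases hA : (PySem.Chars.startswith (PySem.Chars.upper (c :: rest)) ['A','N','D',' '] ||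
              PySem.Chars.startswith (PySem.Chars.upper (c :: rest)) ['A','N','D','\t']) with
          | true =>
            simp only [PySem.Chars.startswith, Bool.or_eq_true, List.isPrefixOf_iff_prefix] at hA
            rcases hA with hA | hA
            all_goals {
              obtain ⟨w, hw⟩ := hA
              obtain ⟨hc1, c2, c3, c4, t4, rfl, hc2, hc3, hc4, hup⟩ := pvShape4 hw
              have hne2 : c2 ≠ '\'' := pvNeQuote hc2 (by decide)
              have hne3 : c3 ≠ '\'' := pvNeQuote hc3 (by decide)
              have hne4 : c4 ≠ '\'' := pvNeQuote hc4 (by decide)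
              obtain ⟨h0, tl0, hp4⟩ := pvSplit_cons_shape t4
              have e1 : pvSplit (c4 :: t4) = (c4 :: h0) :: tl0 := by
                simp [pvSplit, hne4, hp4]
              have e2 : pvSplit (c :: c2 :: c3 :: c4 :: t4) = (c :: c2 :: c3 :: c4 :: h0) :: tl0 := by
                simp [pvSplit, hq, hne2, hne3, hne4, hp4]
              rw [show (c2 :: c3 :: c4 :: t4).drop 2 = c4 :: t4 by simp,
                  ih (c4 :: t4) false (cnt + 1) (by simp at hl ⊢; omega), e1, e2]
              simp [pvSeg, PySem.Chars.upper, hc1, hc2, hc3, hc4, pvPosCnt, pvMatch4, List.isPrefixOf]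
              omega }
          | false =>
          cases hO : (PySem.Chars.startswith (PySem.Chars.upper (c :: rest)) ['O','R',' '] ||
              PySem.Chars.startswith (PySem.Chars.upper (c :: rest)) ['O','R','\t']) with
          | true =>
            simp only [PySem.Chars.startswith, Bool.or_eq_true, List.isPrefixOf_iff_prefix] at hO
            rcases hO with hO | hO
            all_goals {
              obtain ⟨w, hw⟩ := hO
              obtain ⟨hc1, c2, c3, t3, rfl, hc2, hc3, hup⟩ := pvShape3 hw
              have hne2 : c2 ≠ '\'' := pvNeQuote hc2 (by decide)
              have hne3 : c3 ≠ '\'' := pvNeQuote hc3 (by decide)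
              obtain ⟨h0, tl0, hp3⟩ := pvSplit_cons_shape t3
              have e1 : pvSplit (c3 :: t3) = (c3 :: h0) :: tl0 := by
                simp [pvSplit, hne3, hp3]
              have e2 : pvSplit (c :: c2 :: c3 :: t3) = (c :: c2 :: c3 :: h0) :: tl0 := by
                simp [pvSplit, hq, hne2, hne3, hp3]
              rw [show (c2 :: c3 :: t3).drop 1 = c3 :: t3 by simp,
                  ih (c3 :: t3) false (cnt + 1) (by simp at hl ⊢; omega), e1, e2]
              simp [pvSeg, PySem.Chars.upper, hc1, hc2, hc3, pvPosCnt, pvMatch4, List.isPrefixOf]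
              omega }
          | false =>
            rw [ih rest false cnt (by simp at hl; omega), hp, hsp]
            have hpre : p <+: rest := pvSplit_head_prefix rest hp
            have hm : pvMatch4 (PySem.Chars.upperChar c :: PySem.Chars.upper p) = false := by
              cases hm' : pvMatch4 (PySem.Chars.upperChar c :: PySem.Chars.upper p) with
              | false => rfl
              | true =>
                have : pvMatch4 (PySem.Chars.upperChar c :: PySem.Chars.upper rest) = true :=
                  pvMatch4_mono (List.IsPrefix.map _ hpre) hm'
                have hu' : PySem.Chars.upper (c :: rest) =
                    PySem.Chars.upperChar c :: List.map PySem.Chars.upperChar rest := by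
                  simp [PySem.Chars.upper]
                simp only [PySem.Chars.startswith, hu'] at hA hO
                simp only [pvMatch4, Bool.or_eq_true, List.isPrefixOf_iff_prefix, PySem.Chars.upper] at this
                simp only [Bool.or_eq_false_iff] at hA hO
                rcases this with ((hx | hx) | hx) | hx
                · exact absurd (List.isPrefixOf_iff_prefix.mpr hx) (by simp [hA.1])
                · exact absurd (List.isPrefixOf_iff_prefix.mpr hx) (by simp [hA.2])
                · exact absurd (List.isPrefixOf_iff_prefix.mpr hx) (by simp [hO.1])
                · exact absurd (List.isPrefixOf_iff_prefix.mpr hx) (by simp [hO.2])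
            have hpos : pvPosCnt (PySem.Chars.upper (c :: p)) = pvPosCnt (PySem.Chars.upper p) := by
              rw [show PySem.Chars.upper (c :: p) = PySem.Chars.upperChar c :: PySem.Chars.upper p
                    from by simp [PySem.Chars.upper],
                  pvPosCnt, hm]
              simp
            simp [pvSeg, hpos]

-- B's loop computes the same alternating sum
lemma pvCnt4_eq (p : List Char) : pvCnt4 p = pvPosCnt (PySem.Chars.upper p) := by
  rw [pvCnt4]
  rw [pvCount_eq _ ['A','N','D',' '] (by simp), pvCount_eq _ ['A','N','D','\t'] (by simp),
      pvCount_eq _ ['O','R',' '] (by simp), pvCount_eq _ ['O','R','\t'] (by simp)]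
  exact pvG4 (PySem.Chars.upper p).length _ le_rfl

lemma pvSumB_eq : ∀ (ps : List (List Char)) (idx total : Nat),
    pvSumB idx total ps = total + pvSeg (!(decide (idx % 2 = 0))) ps := by
  intro ps
  induction ps with
  | nil => intro idx total; simp [pvSumB, pvSeg]
  | cons p rest ih =>
    intro idx total
    rw [pvSumB, ih]
    have hpar : (!(decide ((idx + 1) % 2 = 0))) = !(!(decide (idx % 2 = 0))) := by
      rcases Nat.mod_two_eq_zero_or_one idx with h | h <;> simp [Nat.add_mod, h]
    rw [pvSeg, hpar]
    rcases Nat.mod_two_eq_zero_or_one idx with h | h <;> (simp [h, pvCnt4_eq]; try omega)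

-- ===== VERDICT (by name: the statement is the Claim_ definition above) =====
theorem is_compound_condition_py_spec : Claim_equal_is_compound_condition_py := by
  intro condition _
  unfold Spec_is_compound_condition_py is_compound_condition_py is_compound_condition_py_alt
  rw [pvLoopA_eq condition.toList.length condition.toList false 0 le_rfl,
      pvSumB_eq, pvSplitOn_eq]
  simp
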